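-- pv_equiv track=rewrite | github.com/ssj2vegeta/Harvard-CS-Course- | problem_set2/plates/plates.py | numberchecker
-- ===== SOURCE A (Python) =====
-- list2 = ['a', 'b', 'c', 'd', 'e', 'f', 'g', 'h', 'i', 'j', 'k', 'l', 'm', 'n', 'o', 'p', 'q', 'r', 's', 't', 'u', 'v', 'w', 'x', 'y', 'z', "A","B","C","D","E","F","G","H","I","J","K","L","M","N","O","P","Q","R","S","T","U","V","W","X","Y","Z"]
--
-- list3 = ['0','1','2','3','4','5','6','7','8','9']
--
-- def numberchecker(s):
--     f = 0
--     d = list(s)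
--     x = len(d)
--     for i in range(0,x-1):
--         if d[i] in list2:
--             continue
--         elif d[i] in list3:
--
--                 if d[i+1] in list2:
--                     f += 1
--                 else:
--                     continue
--     if f == 0:
--         return True
--     else:
--         return False
-- ===== SOURCE B (Python) =====
-- import re
--
-- def numberchecker(s):
--     return re.search(r'[0-9][A-Za-z]', s) is None
-- ===== Notes on version B (the rewrite author's own statement) =====
-- stated objective: idiomatic
-- what changed: Replaces the explicit index loop with a counter and per-character list-membership scans by a single C-implemented regular-expression search for a digit immediately followed by an ASCII letter.
import Mathlib
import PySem

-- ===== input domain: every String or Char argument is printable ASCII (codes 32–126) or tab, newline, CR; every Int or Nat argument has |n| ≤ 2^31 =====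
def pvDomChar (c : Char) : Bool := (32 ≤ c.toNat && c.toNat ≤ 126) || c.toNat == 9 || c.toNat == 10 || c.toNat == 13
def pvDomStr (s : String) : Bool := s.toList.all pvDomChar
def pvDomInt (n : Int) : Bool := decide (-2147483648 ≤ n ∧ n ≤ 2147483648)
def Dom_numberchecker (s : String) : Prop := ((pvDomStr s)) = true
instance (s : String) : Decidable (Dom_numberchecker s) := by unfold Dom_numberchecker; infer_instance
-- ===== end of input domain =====

-- B replaces A's explicit index loop (counter + list-membership scans) with a single
-- regular-expression search r'[0-9][A-Za-z]' (ported as a find? over adjacent pairs); same results, more idiomatic.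


-- ===== PORT A =====
-- list2 (letters) and list3 (digits) from the module
def pvList2 : List Char := ['a','b','c','d','e','f','g','h','i','j','k','l','m','n','o','p','q','r','s','t','u','v','w','x','y','z','A','B','C','D','E','F','G','H','I','J','K','L','M','N','O','P','Q','R','S','T','U','V','W','X','Y','Z']
def pvList3 : List Char := ['0','1','2','3','4','5','6','7','8','9']

def numberchecker (s : String) : Bool :=
  let d := s.toList
  let x : Int := (d.length : Int)
  let f : Int := (PySem.List.pyRange 0 (x - 1) 1).foldl (fun f i =>
    if pvList2.contains (PySem.List.pyGetD d i ' ') then f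
    else if pvList3.contains (PySem.List.pyGetD d i ' ') then
      (if pvList2.contains (PySem.List.pyGetD d (i + 1) ' ') then f + 1 else f)
    else f) 0
  if f = 0 then true else false

-- ===== PORT B =====
-- the regex character classes [0-9] and [A-Za-z]
def pvIsDig (c : Char) : Bool := ('0' ≤ c && c ≤ '9')
def pvIsLet (c : Char) : Bool := (('A' ≤ c && c ≤ 'Z') || ('a' ≤ c && c ≤ 'z'))

-- re.search(r'[0-9][A-Za-z]', s) is None: search the two-char pattern over adjacent pairs
def numberchecker_alt (s : String) : Bool :=
  ((s.toList.zip s.toList.tail).find? (fun p => pvIsDig p.1 && pvIsLet p.2)).isNone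

-- ===== PRECONDITION & SPEC =====
def Spec_numberchecker (s : String) (out : Bool) : Prop := out = numberchecker_alt s
instance (s : String) (out : Bool) : Decidable (Spec_numberchecker s out) := by unfold Spec_numberchecker; infer_instance

-- ===== CLAIM (what is proved, stated in full; the proofs are below) =====
def Claim_equal_numberchecker : Prop := ∀ (s : String), Dom_numberchecker s → Spec_numberchecker s (numberchecker s)

-- ===== LEMMAS AND PROOFS =====

lemma contains_list3 (c : Char) : pvList3.contains c = pvIsDig c := by
  rcases c with ⟨⟨v, hv⟩, hvalid⟩
  simp only [pvList3, pvIsDig, List.contains, List.elem_eq_mem, List.mem_cons,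
    List.not_mem_nil, or_false, Char.le_def, UInt32.le_iff_toNat_le, Char.ext_iff,
    ← UInt32.toNat_inj, ← Bool.decide_and]
  rw [decide_eq_decide]
  change v = 48 ∨ v = 49 ∨ v = 50 ∨ v = 51 ∨ v = 52 ∨ v = 53 ∨ v = 54 ∨ v = 55 ∨ v = 56 ∨ v = 57 ↔ 48 ≤ v ∧ v ≤ 57
  omega

lemma contains_list2 (c : Char) : pvList2.contains c = pvIsLet c := by
  rcases c with ⟨⟨v, hv⟩, hvalid⟩
  simp only [pvList2, pvIsLet, List.contains, List.elem_eq_mem, List.mem_cons,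
    List.not_mem_nil, or_false, Char.le_def, UInt32.le_iff_toNat_le, Char.ext_iff,
    ← UInt32.toNat_inj, ← Bool.decide_and, ← Bool.decide_or]
  rw [decide_eq_decide]
  change v = 97 ∨ v = 98 ∨ v = 99 ∨ v = 100 ∨ v = 101 ∨ v = 102 ∨ v = 103 ∨ v = 104 ∨ v = 105 ∨ v = 106 ∨ v = 107 ∨ v = 108 ∨ v = 109 ∨ v = 110 ∨ v = 111 ∨ v = 112 ∨ v = 113 ∨ v = 114 ∨ v = 115 ∨ v = 116 ∨ v = 117 ∨ v = 118 ∨ v = 119 ∨ v = 120 ∨ v = 121 ∨ v = 122 ∨ v = 65 ∨ v = 66 ∨ v = 67 ∨ v = 68 ∨ v = 69 ∨ v = 70 ∨ v = 71 ∨ v = 72 ∨ v = 73 ∨ v = 74 ∨ v = 75 ∨ v = 76 ∨ v = 77 ∨ v = 78 ∨ v = 79 ∨ v = 80 ∨ v = 81 ∨ v = 82 ∨ v = 83 ∨ v = 84 ∨ v = 85 ∨ v = 86 ∨ v = 87 ∨ v = 88 ∨ v = 89 ∨ v = 90 ↔ (65 ≤ v ∧ v ≤ 90) ∨ (97 ≤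 v ∧ v ≤ 122)
  omega

lemma not_dig_of_let (c : Char) (h : pvIsLet c = true) : pvIsDig c = false := by
  rcases c with ⟨⟨v, hv⟩, hvalid⟩
  simp only [pvIsLet, pvIsDig, Char.le_def, UInt32.le_iff_toNat_le, Bool.or_eq_true,
    Bool.and_eq_true, decide_eq_true_eq] at h ⊢
  rw [← Bool.decide_and, decide_eq_false_iff_not]
  change ¬ (48 ≤ v ∧ v ≤ 57)
  revert h
  change (65 ≤ v ∧ v ≤ 90) ∨ (97 ≤ v ∧ v ≤ 122) → _
  omega

-- A's loop body as a function of the adjacent pair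
def pvBody (f : Int) (p : Char × Char) : Int :=
  if pvList2.contains p.1 then f
  else if pvList3.contains p.1 then
    (if pvList2.contains p.2 then f + 1 else f)
  else f

lemma pvBody_step (f : Int) (p : Char × Char) :
    pvBody f p = f + (if (pvIsDig p.1 && pvIsLet p.2) then 1 else 0) := by
  unfold pvBody
  rw [contains_list2, contains_list3, contains_list2]
  cases hl : pvIsLet p.1 with
  | true => simp [not_dig_of_let p.1 hl]
  | false =>
    cases hd : pvIsDig p.1 <;> cases h2 : pvIsLet p.2 <;> simp

lemma fold_body_count (ps : List (Char × Char)) (n : Int) :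
    ps.foldl pvBody n = n + (ps.countP (fun p => pvIsDig p.1 && pvIsLet p.2) : Int) := by
  induction ps generalizing n with
  | nil => simp
  | cons p ps ih =>
    rw [List.foldl_cons, ih, pvBody_step, List.countP_cons]
    by_cases h : (pvIsDig p.1 && pvIsLet p.2) = true <;> simp [h] <;> ring

lemma range_fold_eq_pairs (d : List Char) :
    (PySem.List.pyRange 0 ((d.length : Int) - 1) 1).foldl (fun f i =>
      if pvList2.contains (PySem.List.pyGetD d i ' ') then f
      else if pvList3.contains (PySem.List.pyGetD d i ' ') then
        (if pvList2.contains (PySem.List.pyGetD d (i + 1) ' ') then f + 1 else f)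
      else f) 0 = (d.zip d.tail).foldl pvBody 0 := by
  rcases d with _ | ⟨c, rest⟩
  · simp [PySem.List.pyRange_one_eq_nil (by omega : (-1 : Int) ≤ 0)]
  · set d := c :: rest with hd
    have hlen : ((d.zip d.tail).length : Int) = (d.length : Int) - 1 := by
      simp [List.length_zip, hd]
    rw [show ((d.length : Int) - 1) = ((d.zip d.tail).length : Int) from hlen.symm]
    rw [PySem.List.foldl_congr_mem (g := fun f i =>
      pvBody f (PySem.List.pyGetD (d.zip d.tail) i (' ', ' ')))]
    · exact PySem.List.foldl_pyRange_zero_pyGetD (d.zip d.tail) (' ', ' ') pvBody 0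
    · intro acc i hi
      rw [PySem.List.mem_pyRange_one] at hi
      obtain ⟨h0, h1⟩ := hi
      obtain ⟨k, rfl⟩ := Int.eq_ofNat_of_zero_le h0
      have hk : k < (d.zip d.tail).length := by exact_mod_cast h1
      have hk1 : k < d.length := by
        simp [List.length_zip] at hk ⊢; omega
      have hk2 : k + 1 < d.length := by
        simp [List.length_zip] at hk ⊢; omega
      have hzip : PySem.List.pyGetD (d.zip d.tail) (k : Int) (' ', ' ') = (d.zip d.tail)[k] := by
        rw [PySem.List.pyGetD_natCast]; exact List.getD_eq_getElem _ _ hk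
      have hg1 : PySem.List.pyGetD d (k : Int) ' ' = d[k] := by
        rw [PySem.List.pyGetD_natCast]; exact List.getD_eq_getElem _ _ hk1
      have hg2 : PySem.List.pyGetD d ((k : Int) + 1) ' ' = d[k + 1] := by
        rw [show ((k : Int) + 1) = ((k + 1 : Nat) : Int) by omega]
        rw [PySem.List.pyGetD_natCast]; exact List.getD_eq_getElem _ _ hk2
      have hpair : (d.zip d.tail)[k] = (d[k], d[k + 1]) := by
        simp [List.getElem_zip, List.getElem_tail]
      rw [hzip, hpair, hg1, hg2, pvBody]

-- ===== VERDICT (by name: the statement is the Claim_ definition above) =====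
theorem numberchecker_spec : Claim_equal_numberchecker := by
  intro s _
  unfold Spec_numberchecker numberchecker numberchecker_alt
  dsimp only
  rw [range_fold_eq_pairs, fold_body_count]
  simp only [zero_add, Nat.cast_eq_zero]
  by_cases h : List.countP (fun p => pvIsDig p.1 && pvIsLet p.2) (s.toList.zip s.toList.tail) = 0
  · rw [if_pos (by exact_mod_cast h)]
    rw [List.countP_eq_zero] at h
    rw [eq_comm, Option.isNone_iff_eq_none, List.find?_eq_none]
    exact h
  · rw [if_neg (by exact_mod_cast h)]
    cases hf : List.find? (fun p => pvIsDig p.1 && pvIsLet p.2) (s.toList.zip s.toList.tail) with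
    | some v => rfl
    | none =>
      exfalso
      rw [List.find?_eq_none] at hf
      exact h (List.countP_eq_zero.mpr hf)
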